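-- pv_equiv track=rewrite | github.com/yasufumi-nakata/Pytra | src/pytra/compiler/east_parts/core.py | _sh_parse_augassign
-- ===== SOURCE A (Python) =====
-- def _sh_parse_augassign(text: str) -> tuple[str, str, str] | None:
--     """`target <op>= expr` をトップレベルで分解して返す。"""
--     raw = text.strip()
--     if raw == "":
--         return None
--     ops = ["<<=", ">>=", "//=", "+=", "-=", "*=", "/=", "%=", "&=", "|=", "^="]
--     depth = 0
--     in_str: str | None = None
--     esc = False
--     for i, ch in enumerate(raw):
--         if in_str is not None:
--             if esc:
--                 esc = False
--             elif ch == "\\":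
--                 esc = True
--             elif ch == in_str:
--                 in_str = None
--             continue
--         if ch in {"'", '"'}:
--             in_str = ch
--             continue
--         if ch in {"(", "[", "{"}:
--             depth += 1
--             continue
--         if ch in {")", "]", "}"}:
--             depth -= 1
--             continue
--         if depth == 0:
--             for op in ops:
--                 if raw[i : i + len(op)] == op:
--                     left = raw[:i].strip()
--                     right = raw[i + len(op) :].strip()
--                     if left == "" or right == "":
--                         return None
--                     # allow Name / Attribute / Subscript lvalues, e.g. "a[i] += 1"
--                     if left.count("=") > 0:
--                         return None
--                     return left, op, right
--     return None
-- ===== SOURCE B (Python) =====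
-- def _sh_parse_augassign(text: str) -> tuple[str, str, str] | None:
--     """Two-pass version: first mark top-level positions, then scan them for an operator."""
--     raw = text.strip()
--     if raw == "":
--         return None
--     ops = ["<<=", ">>=", "//=", "+=", "-=", "*=", "/=", "%=", "&=", "|=", "^="]
--     # pass 1: toplevel[i] = position i is at bracket depth 0 and outside any string literal
--     # (quote/bracket characters themselves stay unmarked, as in the original scan)
--     mask = []
--     depth = 0
--     in_str = None
--     esc = False
--     for ch in raw:
--         if in_str is not None:
--             mask.append(False)
--             if esc:
--                 esc = False
--             elif ch == "\\":
--                 esc = True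
--             elif ch == in_str:
--                 in_str = None
--         elif ch in "'\"":
--             mask.append(False)
--             in_str = ch
--         elif ch in "([{":
--             mask.append(False)
--             depth += 1
--         elif ch in ")]}":
--             mask.append(False)
--             depth -= 1
--         else:
--             mask.append(depth == 0)
--     # pass 2: first marked position where an operator starts decides the split
--     for i, ok in enumerate(mask):
--         if not ok:
--             continue
--         for op in ops:
--             if raw[i:i + len(op)] == op:
--                 left = raw[:i].strip()
--                 right = raw[i + len(op):].strip()
--                 if left == "" or right == "" or left.count("=") > 0:
--                     return None
--                 return left, op, right
--     return None
-- ===== Notes on version B (the rewrite author's own statement) =====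
-- stated objective: alternative
-- what changed: Replaces A's single stateful scan (string/escape/bracket state interleaved with the operator check) by two passes: one pass builds a boolean mask of top-level positions, a second pass tries the 11 operators only at marked positions.
import Mathlib
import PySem

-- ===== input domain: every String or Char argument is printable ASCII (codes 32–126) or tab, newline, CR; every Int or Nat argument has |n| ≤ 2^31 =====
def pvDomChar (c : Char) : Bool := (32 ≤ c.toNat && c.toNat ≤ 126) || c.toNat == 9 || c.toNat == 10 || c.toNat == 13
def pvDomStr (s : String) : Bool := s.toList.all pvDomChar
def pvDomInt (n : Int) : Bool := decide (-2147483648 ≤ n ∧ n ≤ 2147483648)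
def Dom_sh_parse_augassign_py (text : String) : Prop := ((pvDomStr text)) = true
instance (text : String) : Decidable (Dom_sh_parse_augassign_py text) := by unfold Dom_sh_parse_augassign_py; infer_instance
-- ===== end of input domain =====

-- B replaces A's single stateful scan by two passes: a mask of top-level positions, then a
-- scan over the marked positions (objective: alternative decomposition; same cost).

-- ===== PORT A =====
def pvOpsA : List (List Char) :=
  ["<<=".toList, ">>=".toList, "//=".toList, "+=".toList, "-=".toList,
   "*=".toList, "/=".toList, "%=".toList, "&=".toList, "|=".toList, "^=".toList]

-- inner 'for op in ops' of A: none = no operator matches at i; some r = 'return r'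
def pvTryOpA (raw : List Char) (i : Nat) : List (List Char) → Option (Option (String × String × String))
  | [] => none
  | op :: rest =>
    if (raw.drop i).take op.length == op then
      let left := PySem.Chars.strip (raw.take i)
      let right := PySem.Chars.strip (raw.drop (i + op.length))
      if left == [] || right == [] then some none
      else if PySem.Chars.count left ['='] > 0 then some none
      else some (some (String.ofList left, String.ofList op, String.ofList right))
    else pvTryOpA raw i rest

-- A's main loop over enumerate(raw) with state (depth, in_str, esc)
def pvLoopA (raw : List Char) : Nat → List Char → Int → Option Char → Bool → Option (String × String × String)
  | _, [], _, _, _ => none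
  | i, ch :: rest, depth, instr, esc =>
    match instr with
    | some q =>
      if esc then pvLoopA raw (i+1) rest depth (some q) false
      else if ch == '\\' then pvLoopA raw (i+1) rest depth (some q) true
      else if ch == q then pvLoopA raw (i+1) rest depth none esc
      else pvLoopA raw (i+1) rest depth (some q) esc
    | none =>
      if ch == '\'' || ch == '"' then pvLoopA raw (i+1) rest depth (some ch) esc
      else if ch == '(' || ch == '[' || ch == '{' then pvLoopA raw (i+1) rest (depth+1) none esc
      else if ch == ')' || ch == ']' || ch == '}' then pvLoopA raw (i+1) rest (depth-1) none esc
      else if depth == 0 then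
        match pvTryOpA raw i pvOpsA with
        | some r => r
        | none => pvLoopA raw (i+1) rest depth none esc
      else pvLoopA raw (i+1) rest depth none esc

def sh_parse_augassign_py (text : String) : Option (String × String × String) :=
  let raw := (PySem.Str.strip text).toList
  if raw == [] then none
  else pvLoopA raw 0 raw 0 none false

-- ===== PORT B =====
def pvOpsB : List (List Char) :=
  ["<<=".toList, ">>=".toList, "//=".toList, "+=".toList, "-=".toList,
   "*=".toList, "/=".toList, "%=".toList, "&=".toList, "|=".toList, "^=".toList]

-- B pass 1: boolean mask of top-level (depth 0, outside string literals) positions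
def pvMask : Int → Option Char → Bool → List Char → List Bool
  | _, _, _, [] => []
  | depth, some q, esc, ch :: rest =>
    if esc then false :: pvMask depth (some q) false rest
    else if ch == '\\' then false :: pvMask depth (some q) true rest
    else if ch == q then false :: pvMask depth none esc rest
    else false :: pvMask depth (some q) esc rest
  | depth, none, esc, ch :: rest =>
    if ch == '\'' || ch == '"' then false :: pvMask depth (some ch) esc rest
    else if ch == '(' || ch == '[' || ch == '{' then false :: pvMask (depth+1) none esc rest
    else if ch == ')' || ch == ']' || ch == '}' then false :: pvMask (depth-1) none esc rest
    else (depth == 0) :: pvMask depth none esc rest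

-- B's inner 'for op in ops' (the guard line is the combined form Source B writes)
def pvTryOpB (raw : List Char) (i : Nat) : List (List Char) → Option (Option (String × String × String))
  | [] => none
  | op :: rest =>
    if (raw.drop i).take op.length == op then
      let left := PySem.Chars.strip (raw.take i)
      let right := PySem.Chars.strip (raw.drop (i + op.length))
      if left == [] || right == [] || PySem.Chars.count left ['='] > 0 then some none
      else some (some (String.ofList left, String.ofList op, String.ofList right))
    else pvTryOpB raw i rest

-- B pass 2: scan the marked positions in order
def pvFindB (raw : List Char) : Nat → List Bool → Option (String × String × String)
  | _, [] => none
  | i, ok :: ms =>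
    if ok then
      match pvTryOpB raw i pvOpsB with
      | some r => r
      | none => pvFindB raw (i+1) ms
    else pvFindB raw (i+1) ms

def sh_parse_augassign_py_alt (text : String) : Option (String × String × String) :=
  let raw := (PySem.Str.strip text).toList
  if raw == [] then none
  else pvFindB raw 0 (pvMask 0 none false raw)

-- ===== PRECONDITION & SPEC =====
def Spec_sh_parse_augassign_py (text : String) (out : Option (String × String × String)) : Prop := out = sh_parse_augassign_py_alt text
instance (text : String) (out : Option (String × String × String)) : Decidable (Spec_sh_parse_augassign_py text out) := by unfold Spec_sh_parse_augassign_py; infer_instance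

-- ===== CLAIM (what is proved, stated in full; the proofs are below) =====
def Claim_equal_sh_parse_augassign_py : Prop := ∀ (text : String), Dom_sh_parse_augassign_py text → Spec_sh_parse_augassign_py text (sh_parse_augassign_py text)

-- ===== LEMMAS AND PROOFS =====

theorem pvOpsB_eq : pvOpsB = pvOpsA := rfl

-- the two inner operator loops coincide (A splits the guard in two, B writes it combined)
theorem pvTryOp_eq (raw : List Char) (i : Nat) (ops : List (List Char)) :
    pvTryOpB raw i ops = pvTryOpA raw i ops := by
  induction ops with
  | nil => rfl
  | cons op rest ih =>
    simp only [pvTryOpA, pvTryOpB]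
    split_ifs <;> simp_all

-- A's stateful scan equals B's scan of the mask built from the same state
theorem loopA_eq_findB (raw : List Char) (rest : List Char) :
    ∀ (i : Nat) (depth : Int) (instr : Option Char) (esc : Bool),
      pvLoopA raw i rest depth instr esc = pvFindB raw i (pvMask depth instr esc rest) := by
  induction rest with
  | nil => intro i depth instr esc; rfl
  | cons ch rest ih =>
    intro i depth instr esc
    cases instr with
    | some q =>
      simp only [pvLoopA, pvMask]
      split_ifs <;> simp [pvFindB, ih]
    | none =>
      simp only [pvLoopA, pvMask]
      split_ifs with h1 h2 h3 h4
      · simp [pvFindB, ih]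
      · simp [pvFindB, ih]
      · simp [pvFindB, ih]
      · simp only [pvFindB, if_pos h4, pvTryOp_eq, pvOpsB_eq]
        cases pvTryOpA raw i pvOpsA <;> simp [ih]
      · simp [pvFindB, h4, ih]

-- ===== VERDICT (by name: the statement is the Claim_ definition above) =====
theorem sh_parse_augassign_py_spec : Claim_equal_sh_parse_augassign_py := by
  intro text _
  unfold Spec_sh_parse_augassign_py sh_parse_augassign_py sh_parse_augassign_py_alt
  simp only [loopA_eq_findB]
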